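-- pv_equiv track=rewrite | github.com/mld-0/hackerrank | 3-months-prep/10-01-weighted-uniform-strings.py | allUCSWeights
-- ===== SOURCE A (Python) =====
-- def allUCSWeights(s):
--     l = 0
--     r = 0
--     result = set()
--     while l < len(s):
--         r = l
--         while r < len(s) and s[l] == s[r]:
--             loop_substr = s[l:r+1]
--             loop_code = (ord(loop_substr[0]) - ord('a') + 1) * len(loop_substr)
--             result.add(loop_code)
--             r += 1
--         l = r
--     return result
-- ===== SOURCE B (Python) =====
-- def allUCSWeights(s):
--     result = set()
--     run = 0
--     prev = None
--     for ch in s: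
--         run = run + 1 if ch == prev else 1
--         prev = ch
--         result.add((ord(ch) - ord('a') + 1) * run)
--     return result
-- ===== Notes on version B (the rewrite author's own statement) =====
-- stated objective: faster
-- what changed: Replaced the nested while-loops that re-slice each uniform prefix (quadratic substring work) by a single left-to-right pass that tracks the current run length and adds the character weight times the run length incrementally.
import Mathlib
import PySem

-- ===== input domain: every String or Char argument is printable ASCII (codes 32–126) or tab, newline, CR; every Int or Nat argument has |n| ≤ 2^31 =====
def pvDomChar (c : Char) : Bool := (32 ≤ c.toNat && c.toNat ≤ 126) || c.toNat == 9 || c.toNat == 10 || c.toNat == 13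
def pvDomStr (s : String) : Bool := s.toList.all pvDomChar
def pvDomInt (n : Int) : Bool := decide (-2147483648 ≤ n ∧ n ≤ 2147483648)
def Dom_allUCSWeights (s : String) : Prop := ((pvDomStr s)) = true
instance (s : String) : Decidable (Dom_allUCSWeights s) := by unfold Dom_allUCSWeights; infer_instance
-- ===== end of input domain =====

-- B replaces A's nested scans with re-slicing by a single pass tracking the run length (O(n^2) -> O(n)).


-- ===== PORT A =====
-- inner while loop: 'while r < len(s) and s[l] == s[r]: ...; r += 1'.
-- The fuel argument only makes the recursion structural: it starts at cs.length - r and the loop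
-- can run at most that many times (each iteration needs r < cs.length), so it never runs out.
-- Indices l ≤ r are always in range when accessed, so pyGetD is exact.
def aInner (cs : List Char) (l : Nat) : Nat → Nat → PySem.Set Int → Nat × PySem.Set Int
  | 0, r, acc => (r, acc)
  | fuel + 1, r, acc =>
    if r < cs.length ∧ PySem.List.pyGetD cs (l : Int) 'a' = PySem.List.pyGetD cs (r : Int) 'a' then
      let sub := PySem.List.slice cs (some (l : Int)) (some ((r : Int) + 1))   -- s[l:r+1]
      let code : Int := (((PySem.List.pyGetD sub (0 : Int) 'a').toNat : Int) - (('a'.toNat : Int)) + 1) * (sub.length : Int)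
      aInner cs l fuel (r + 1) (PySem.Set.add acc code)
    else
      (r, acc)

-- outer while loop: 'while l < len(s): r = l; <inner>; l = r'; fuel = cs.length - l bounds the iterations
-- (each outer iteration moves l forward by at least one).
def aOuter (cs : List Char) : Nat → Nat → PySem.Set Int → PySem.Set Int
  | 0, _, acc => acc
  | fuel + 1, l, acc =>
    if l < cs.length then
      let p := aInner cs l (cs.length - l) l acc
      aOuter cs fuel p.1 p.2
    else
      acc

def allUCSWeights (s : String) : List Int := aOuter s.toList s.toList.length 0 PySem.Set.empty

-- ===== PORT B =====
def bStep (st : Int × Option Char × PySem.Set Int) (ch : Char) : Int × Option Char × PySem.Set Int :=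
  let run : Int := if some ch = st.2.1 then st.1 + 1 else 1
  (run, some ch, PySem.Set.add st.2.2 (((ch.toNat : Int) - (('a'.toNat : Int)) + 1) * run))

def allUCSWeights_alt (s : String) : List Int :=
  (s.toList.foldl bStep (0, none, PySem.Set.empty)).2.2

-- ===== PRECONDITION & SPEC =====
def Spec_allUCSWeights (s : String) (out : List Int) : Prop := out = allUCSWeights_alt s
instance (s : String) (out : List Int) : Decidable (Spec_allUCSWeights s out) := by unfold Spec_allUCSWeights; infer_instance

-- ===== CLAIM (what is proved, stated in full; the proofs are below) =====
def Claim_equal_allUCSWeights : Prop := ∀ (s : String), Dom_allUCSWeights s → Spec_allUCSWeights s (allUCSWeights s)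

-- ===== LEMMAS AND PROOFS =====

-- the weight A computes from the slice s[l:r+1] is (ord(s[l]) - ord('a') + 1) * (r + 1 - l)
theorem code_eq (cs : List Char) (l r : Nat) (hlr : l ≤ r) (hr : r < cs.length) :
    (((PySem.List.pyGetD (PySem.List.slice cs (some (l : Int)) (some ((r : Int) + 1))) (0 : Int) 'a').toNat : Int)
        - (('a'.toNat : Int)) + 1) * ((PySem.List.slice cs (some (l : Int)) (some ((r : Int) + 1))).length : Int)
      = ((cs.getD l 'a').toNat - (('a'.toNat : Int)) + 1) * ((r : Int) + 1 - (l : Int)) := by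
  have h1 : ((r : Int) + 1) = ((r + 1 : Nat) : Int) := by push_cast; ring
  rw [h1, PySem.List.slice_natCast]
  have hlen : ((cs.drop l).take (r + 1 - l)).length = r + 1 - l := by
    simp [List.length_take, List.length_drop]; omega
  have hget : PySem.List.pyGetD ((cs.drop l).take (r + 1 - l)) (0 : Int) 'a' = cs.getD l 'a' := by
    rw [PySem.List.pyGetD_zero]
    have : ((cs.drop l).take (r + 1 - l))[0]? = cs[l]? := by
      rw [List.getElem?_take_of_lt (by omega), List.getElem?_drop]
      simp
    simp [List.getD, this]
  rw [hget, hlen]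
  push_cast [Nat.cast_sub (by omega : l ≤ r + 1)]
  ring

theorem inner_sim (cs : List Char) (l : Nat) (fuel r : Nat) (acc : PySem.Set Int)
    (hlr : l < r) (hfuel : cs.length - r ≤ fuel) (hr : r ≤ cs.length) :
    r ≤ (aInner cs l fuel r acc).1 ∧ (aInner cs l fuel r acc).1 ≤ cs.length ∧
    ((aInner cs l fuel r acc).1 < cs.length → cs.getD (aInner cs l fuel r acc).1 'a' ≠ cs.getD l 'a') ∧
    (cs.drop r).foldl bStep (((r : Int) - (l : Int)), some (cs.getD l 'a'), acc)
      = (cs.drop (aInner cs l fuel r acc).1).foldl bStep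
          ((((aInner cs l fuel r acc).1 : Int) - (l : Int)), some (cs.getD l 'a'), (aInner cs l fuel r acc).2) := by
  fun_induction aInner cs l fuel r acc with
  | case1 r acc =>
    have hrl : r = cs.length := by omega
    exact ⟨le_refl r, hr, by omega, rfl⟩
  | case2 fuel r acc h sub code ih =>
    obtain ⟨hrlen, heq⟩ := h
    have heq' : cs.getD r 'a' = cs.getD l 'a' := by
      rw [PySem.List.pyGetD_natCast, PySem.List.pyGetD_natCast] at heq
      exact heq.symm
    obtain ⟨ih1, ih2, ih3, ih4⟩ := ih (by omega) (by omega) (by omega)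
    refine ⟨by omega, ih2, ih3, ?_⟩
    rw [← ih4]
    -- one step of B's fold over cs.drop r = cs[r] :: cs.drop (r+1)
    have hdrop : cs.drop r = cs[r] :: cs.drop (r + 1) := List.drop_eq_getElem_cons hrlen
    rw [hdrop, List.foldl_cons]
    congr 1
    have hcr : cs[r] = cs.getD l 'a' := by
      rw [← heq']; simp [List.getD, List.getElem?_eq_getElem hrlen]
    show bStep (((r : Int) - (l : Int)), some (cs.getD l 'a'), acc) cs[r]
        = (((r + 1 : Nat) : Int) - (l : Int), some (cs.getD l 'a'), PySem.Set.add acc code)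
    rw [bStep]
    simp only [hcr]
    have hcode : code = ((cs.getD l 'a').toNat - (('a'.toNat : Int)) + 1) * ((r : Int) + 1 - (l : Int)) :=
      code_eq cs l r (by omega) hrlen
    have hrun : ((r : Int) - (l : Int)) + 1 = ((r + 1 : Nat) : Int) - (l : Int) := by push_cast; ring
    rw [hcode, hrun]
    simp only [if_true, Nat.cast_add, Nat.cast_one]
  | case3 fuel r acc h =>
    refine ⟨le_refl r, hr, ?_, rfl⟩
    intro hrlen hcon
    apply h
    refine ⟨hrlen, ?_⟩
    rw [PySem.List.pyGetD_natCast, PySem.List.pyGetD_natCast]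
    exact hcon.symm

theorem outer_sim (cs : List Char) (fuel l : Nat) (acc : PySem.Set Int) :
    ∀ (run : Int) (prev : Option Char), cs.length - l ≤ fuel → l ≤ cs.length →
    (l < cs.length → prev ≠ some (cs.getD l 'a')) →
    aOuter cs fuel l acc = ((cs.drop l).foldl bStep (run, prev, acc)).2.2 := by
  fun_induction aOuter cs fuel l acc with
  | case1 l acc =>
    intro run prev hfuel hl hprev
    have hlen : l = cs.length := by omega
    rw [hlen, List.drop_length, List.foldl_nil]
  | case2 fuel l acc h p ih =>
    intro run prev hfuel hl hprev
    -- unfold the first iteration of the inner loop (guard true at r = l; fuel cs.length - l ≥ 1)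
    obtain ⟨k, hk⟩ : ∃ k, cs.length - l = k + 1 := ⟨cs.length - l - 1, by omega⟩
    have hstep : p = aInner cs l k (l + 1)
        (PySem.Set.add acc ((((PySem.List.pyGetD (PySem.List.slice cs (some (l : Int)) (some ((l : Int) + 1))) (0 : Int) 'a').toNat : Int)
          - (('a'.toNat : Int)) + 1) * ((PySem.List.slice cs (some (l : Int)) (some ((l : Int) + 1))).length : Int))) := by
      rw [show p = aInner cs l (cs.length - l) l acc from rfl, hk, aInner, if_pos (And.intro h rfl)]
    set acc1 := PySem.Set.add acc ((((PySem.List.pyGetD (PySem.List.slice cs (some (l : Int)) (some ((l : Int) + 1))) (0 : Int) 'a').toNat : Int)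
          - (('a'.toNat : Int)) + 1) * ((PySem.List.slice cs (some (l : Int)) (some ((l : Int) + 1))).length : Int)) with hacc1
    obtain ⟨h1, h2, h3, h4⟩ := inner_sim cs l k (l + 1) acc1 (by omega) (by omega) (by omega)
    rw [← hstep] at h1 h2 h3 h4
    rw [ih ((p.1 : Int) - (l : Int)) (some (cs.getD l 'a')) (by omega) h2
        (by intro hp hcon; exact h3 hp (Option.some_inj.mp hcon.symm))]
    rw [← h4]
    -- B's first step over cs.drop l = cs[l] :: cs.drop (l+1)
    have hdrop : cs.drop l = cs[l] :: cs.drop (l + 1) := List.drop_eq_getElem_cons h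
    rw [hdrop, List.foldl_cons]
    congr 2
    have hcl : cs[l] = cs.getD l 'a' := by simp [List.getD, List.getElem?_eq_getElem h]
    have hne : ¬ (some cs[l] = prev) := by
      rw [hcl]; intro hcon; exact hprev h hcon.symm
    rw [bStep]
    simp only [if_neg hne]
    have hcode : ((((PySem.List.pyGetD (PySem.List.slice cs (some (l : Int)) (some ((l : Int) + 1))) (0 : Int) 'a').toNat : Int)
          - (('a'.toNat : Int)) + 1) * ((PySem.List.slice cs (some (l : Int)) (some ((l : Int) + 1))).length : Int))
        = ((cs.getD l 'a').toNat - (('a'.toNat : Int)) + 1) * ((l : Int) + 1 - (l : Int)) :=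
      code_eq cs l l (le_refl l) h
    have hstate : ((((l + 1 : Nat) : Int) - (l : Int)), some (cs.getD l 'a'), acc1)
        = ((1 : Int), some cs[l], PySem.Set.add acc (((cs[l].toNat : Int) - (('a'.toNat : Int)) + 1) * 1)) := by
      rw [hacc1, hcode, hcl]
      simp only [Prod.mk.injEq, true_and]
      refine ⟨by push_cast; ring, ?_⟩
      congr 1
      push_cast
      ring
    rw [hstate]
  | case3 fuel l acc h =>
    intro run prev hfuel hl hprev
    have hlen : l = cs.length := by omega
    rw [hlen, List.drop_length, List.foldl_nil]

-- ===== VERDICT (by name: the statement is the Claim_ definition above) =====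
theorem allUCSWeights_spec : Claim_equal_allUCSWeights := by
  intro s _
  show aOuter s.toList s.toList.length 0 PySem.Set.empty = allUCSWeights_alt s
  rw [allUCSWeights_alt, outer_sim s.toList s.toList.length 0 PySem.Set.empty 0 none
      (by omega) (by omega) (by intro _ h; cases h)]
  rfl
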